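-- pv_equiv track=rewrite | github.com/chimuichimu/Codility | 05_PrefixSums/GenomicRangeQuery/GenomicRangeQuery_02.py | solution
-- ===== SOURCE A (Python) =====
-- def solution(S, P, Q):
--
--     dna = {"A":1, "C":2, "G":3, "T":4}
--     cnt_acgt = [0,0,0,0]
--     cnt_acgt_each_step = []
--     answer = []
--
--     # Count A, C, G and T at each step
--     for s in S:
--         if s == "A":
--             cnt_acgt[0] += 1
--         elif s == "C":
--             cnt_acgt[1] += 1
--         elif s == "G":
--             cnt_acgt[2] += 1
--         else:
--             cnt_acgt[3] += 1
--         cnt_acgt_each_step.append(cnt_acgt.copy())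
--
--     for p, q in zip(P, Q):
--         left = cnt_acgt_each_step[p]
--         right = cnt_acgt_each_step[q]
--
--         minimal_impact_factor = 4
--
--         if left[0] < right[0]:
--             minimal_impact_factor = 1
--         elif left[1] < right[1]:
--             minimal_impact_factor = 2
--         elif left[2] < right[2]:
--             minimal_impact_factor = 3
--         elif left[3] < right[3]:
--             minimal_impact_factor = 4
--         minimal_impact_factor = min(minimal_impact_factor, dna[S[p]])
--
--         answer.append(minimal_impact_factor)
--
--     return answer
-- ===== SOURCE B (Python) =====
-- def solution(S, P, Q):
--     dna = {"A": 1, "C": 2, "G": 3, "T": 4}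
--     answer = []
--     for p, q in zip(P, Q):
--         ans = dna[S[p]]
--         for c in S[p + 1:q + 1]:
--             ans = min(ans, dna.get(c, 4))
--         answer.append(ans)
--     return answer
-- ===== Notes on version B (the rewrite author's own statement) =====
-- stated objective: simpler
-- what changed: Drops the per-position prefix-count snapshots and the count-difference branch chain; each query is answered directly by folding min over the impact factors of the slice S[p+1:q+1], seeded with dna[S[p]].
-- outside the precondition, e.g. on solution('AC', [-1], [1]): A returns [2], B returns [1]
import Mathlib
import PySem

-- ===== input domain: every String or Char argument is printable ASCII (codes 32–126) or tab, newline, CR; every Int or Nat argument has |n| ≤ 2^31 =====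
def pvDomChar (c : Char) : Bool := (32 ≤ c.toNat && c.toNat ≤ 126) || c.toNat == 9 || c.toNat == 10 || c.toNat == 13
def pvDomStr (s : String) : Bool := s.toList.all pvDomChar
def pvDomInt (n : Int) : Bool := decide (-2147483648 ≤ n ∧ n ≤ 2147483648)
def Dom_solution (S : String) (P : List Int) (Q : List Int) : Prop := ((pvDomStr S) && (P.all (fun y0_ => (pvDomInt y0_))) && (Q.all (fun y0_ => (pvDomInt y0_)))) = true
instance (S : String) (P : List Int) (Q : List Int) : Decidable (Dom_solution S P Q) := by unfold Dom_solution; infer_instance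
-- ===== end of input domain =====

-- B replaces A's prefix-count snapshots and count-difference branch chain by a direct
-- min-fold over the impact factors of the slice S[p+1:q+1], seeded with dna[S[p]] (objective: simpler).

-- ===== PORT A =====
-- the shared literal dict dna = {"A":1, "C":2, "G":3, "T":4}
def solDna : PySem.Dict Char Int := PySem.Dict.ofList [('A',1),('C',2),('G',3),('T',4)]

-- one step of A's counting loop body (the if/elif chain updating cnt_acgt)
def solBump (cnt : List Int) (c : Char) : List Int :=
  if c = 'A' then PySem.List.pySetD cnt 0 (PySem.List.pyGetD cnt 0 0 + 1)
  else if c = 'C' then PySem.List.pySetD cnt 1 (PySem.List.pyGetD cnt 1 0 + 1)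
  else if c = 'G' then PySem.List.pySetD cnt 2 (PySem.List.pyGetD cnt 2 0 + 1)
  else PySem.List.pySetD cnt 3 (PySem.List.pyGetD cnt 3 0 + 1)

def solution (S : String) (P : List Int) (Q : List Int) : List Int :=
  let steps :=
    (S.toList.foldl
      (fun (st : List Int × List (List Int)) s =>
        let cnt := solBump st.1 s
        (cnt, st.2 ++ [cnt]))
      (([0,0,0,0] : List Int), ([] : List (List Int)))).2
  (P.zip Q).foldl
    (fun answer pq =>
      answer ++
        [(let left := PySem.List.pyGetD steps pq.1 []
          let right := PySem.List.pyGetD steps pq.2 []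
          let m : Int :=
            if PySem.List.pyGetD left 0 0 < PySem.List.pyGetD right 0 0 then 1
            else if PySem.List.pyGetD left 1 0 < PySem.List.pyGetD right 1 0 then 2
            else if PySem.List.pyGetD left 2 0 < PySem.List.pyGetD right 2 0 then 3
            else if PySem.List.pyGetD left 3 0 < PySem.List.pyGetD right 3 0 then 4
            else 4
          min m (solDna.getD ((PySem.Str.pyGet? S pq.1).getD ' ') 0))])
    []

-- ===== PORT B =====
def solution_alt (S : String) (P : List Int) (Q : List Int) : List Int :=
  (P.zip Q).foldl
    (fun answer pq =>
      answer ++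
        [((PySem.Chars.slice S.toList (some (pq.1 + 1)) (some (pq.2 + 1))).foldl
            (fun a c => min a (solDna.getD c 4))
            (solDna.getD ((PySem.Str.pyGet? S pq.1).getD ' ') 0))])
    []

-- ===== PRECONDITION & SPEC =====
-- Pre_ excludes queries that index S negatively (Python wraparound: A's value there is an
-- accident of indexing from the end) or out of range / at a non-ACGT character (where A raises
-- IndexError / KeyError).
def Pre_solution (S : String) (P : List Int) (Q : List Int) : Prop :=
  ∀ pq ∈ P.zip Q,
    0 ≤ pq.1 ∧ pq.1 < (S.toList.length : Int) ∧
    0 ≤ pq.2 ∧ pq.2 < (S.toList.length : Int) ∧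
    (PySem.Str.pyGet? S pq.1).getD ' ' ∈ (['A','C','G','T'] : List Char)
instance (S : String) (P : List Int) (Q : List Int) : Decidable (Pre_solution S P Q) := by
  unfold Pre_solution; infer_instance

def pvWitness_solution : String × List Int × List Int := ("ACGT", [0, 1], [2, 3])

def Spec_solution (S : String) (P : List Int) (Q : List Int) (out : List Int) : Prop := out = solution_alt S P Q
instance (S : String) (P : List Int) (Q : List Int) (out : List Int) : Decidable (Spec_solution S P Q out) := by unfold Spec_solution; infer_instance

-- ===== CLAIM (what is proved, stated in full; the proofs are below) =====
def Claim_equal_solution : Prop := ∀ (S : String) (P : List Int) (Q : List Int), Dom_solution S P Q → Pre_solution S P Q → Spec_solution S P Q (solution S P Q)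

-- ===== LEMMAS AND PROOFS =====

-- per-query value of port A, over the character list
def solAVal (cs : List Char) (p q : Int) : Int :=
  let steps :=
    (cs.foldl
      (fun (st : List Int × List (List Int)) s =>
        let cnt := solBump st.1 s
        (cnt, st.2 ++ [cnt]))
      (([0,0,0,0] : List Int), ([] : List (List Int)))).2
  let left := PySem.List.pyGetD steps p []
  let right := PySem.List.pyGetD steps q []
  let m : Int :=
    if PySem.List.pyGetD left 0 0 < PySem.List.pyGetD right 0 0 then 1
    else if PySem.List.pyGetD left 1 0 < PySem.List.pyGetD right 1 0 then 2
    else if PySem.List.pyGetD left 2 0 < PySem.List.pyGetD right 2 0 then 3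
    else if PySem.List.pyGetD left 3 0 < PySem.List.pyGetD right 3 0 then 4
    else 4
  min m (solDna.getD ((PySem.Chars.pyGet? cs p).getD ' ') 0)

-- per-query value of port B, over the character list
def solBVal (cs : List Char) (p q : Int) : Int :=
  (PySem.Chars.slice cs (some (p + 1)) (some (q + 1))).foldl
    (fun a c => min a (solDna.getD c 4))
    (solDna.getD ((PySem.Chars.pyGet? cs p).getD ' ') 0)

lemma solution_unfold (S : String) (P : List Int) (Q : List Int) :
    solution S P Q = (P.zip Q).foldl (fun answer pq => answer ++ [solAVal S.toList pq.1 pq.2]) [] := rfl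

lemma solution_alt_unfold (S : String) (P : List Int) (Q : List Int) :
    solution_alt S P Q = (P.zip Q).foldl (fun answer pq => answer ++ [solBVal S.toList pq.1 pq.2]) [] := rfl

lemma foldl_app_congr {α β : Type} (l : List α) (f g : α → β) (h : ∀ x ∈ l, f x = g x) :
    ∀ acc : List β, l.foldl (fun a x => a ++ [f x]) acc = l.foldl (fun a x => a ++ [g x]) acc := by
  induction l with
  | nil => intro acc; rfl
  | cons x l ih =>
    intro acc
    simp only [List.foldl_cons, h x (by simp)]
    exact ih (fun y hy => h y (by simp [hy])) _

-- ---- evaluating A's counting loop ----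

lemma snapAux (cs : List Char) : ∀ (cnt : List Int) (acc : List (List Int)),
    (cs.foldl
      (fun (st : List Int × List (List Int)) s =>
        let c := solBump st.1 s
        (c, st.2 ++ [c])) (cnt, acc)).2
    = acc ++ (List.range cs.length).map (fun j => (cs.take (j+1)).foldl solBump cnt) := by
  induction cs with
  | nil => intro cnt acc; simp
  | cons x cs ih =>
    intro cnt acc
    simp only [List.foldl_cons]
    rw [ih]
    simp [List.range_succ_eq_map, List.map_map, Function.comp_def, List.take_succ_cons]

def pT (c : Char) : Bool := !(c == 'A') && !(c == 'C') && !(c == 'G')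

lemma bump_other (a b c d : Int) (ch : Char) (h1 : ch ≠ 'A') (h2 : ch ≠ 'C') (h3 : ch ≠ 'G') :
    solBump [a,b,c,d] ch = [a,b,c,d+1] := by simp [solBump, h1, h2, h3]; rfl

lemma foldl_bump (l : List Char) : ∀ a b c d : Int,
    l.foldl solBump [a,b,c,d] =
      [a + l.countP (· == 'A'), b + l.countP (· == 'C'), c + l.countP (· == 'G'), d + l.countP pT] := by
  induction l with
  | nil => intro a b c d; simp
  | cons x l ih =>
    intro a b c d
    simp only [List.foldl_cons]
    by_cases h1 : x = 'A'
    · subst h1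
      rw [show solBump [a,b,c,d] 'A' = [a+1,b,c,d] from rfl, ih]
      simp [pT]
      omega
    · by_cases h2 : x = 'C'
      · subst h2
        rw [show solBump [a,b,c,d] 'C' = [a,b+1,c,d] from rfl, ih]
        simp [pT]
        omega
      · by_cases h3 : x = 'G'
        · subst h3
          rw [show solBump [a,b,c,d] 'G' = [a,b,c+1,d] from rfl, ih]
          simp [pT]
          omega
        · rw [bump_other a b c d x h1 h2 h3, ih]
          simp [pT, h1, h2, h3]
          omega

-- ---- the impact chain as a min-fold ----

def chainVal (seg : List Char) : Int :=
  if seg.any (· == 'A') then 1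
  else if seg.any (· == 'C') then 2
  else if seg.any (· == 'G') then 3
  else 4

lemma chainVal_bounds (seg : List Char) : 1 ≤ chainVal seg ∧ chainVal seg ≤ 4 := by
  unfold chainVal; split_ifs <;> omega

lemma getD_miss (ch : Char) (h1 : ch ≠ 'A') (h2 : ch ≠ 'C') (h3 : ch ≠ 'G') :
    solDna.getD ch 4 = 4 := by
  by_cases h4 : ch = 'T'
  · subst h4; decide
  · have hd : solDna = PySem.Dict.mk [('A',1),('C',2),('G',3),('T',4)] := by decide
    simp [hd, PySem.Dict.getD, PySem.Dict.get?_mk_cons, Ne.symm h1, Ne.symm h2, Ne.symm h3, Ne.symm h4]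
    rfl

lemma imp_le_four (c : Char) : solDna.getD c 4 ≤ 4 := by
  by_cases h1 : c = 'A'; · subst h1; decide
  by_cases h2 : c = 'C'; · subst h2; decide
  by_cases h3 : c = 'G'; · subst h3; decide
  rw [getD_miss c h1 h2 h3]

lemma foldl_min_min (seg : List Char) : ∀ x y : Int,
    seg.foldl (fun a c => min a (solDna.getD c 4)) (min x y)
      = min x (seg.foldl (fun a c => min a (solDna.getD c 4)) y) := by
  induction seg with
  | nil => intro x y; rfl
  | cons c seg ih =>
    intro x y
    simp only [List.foldl_cons]
    rw [min_assoc, ih]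

lemma foldl_chain (seg : List Char) :
    seg.foldl (fun a c => min a (solDna.getD c 4)) 4 = chainVal seg := by
  induction seg with
  | nil => rfl
  | cons c seg ih =>
    have h4 : solDna.getD c 4 ≤ 4 := imp_le_four c
    have hstep : (c :: seg).foldl (fun a c => min a (solDna.getD c 4)) 4
        = min (solDna.getD c 4) (chainVal seg) := by
      simp only [List.foldl_cons]
      rw [min_eq_right h4, show solDna.getD c 4 = min (solDna.getD c 4) 4 from (min_eq_left h4).symm,
        foldl_min_min, ih]
      rw [min_eq_left h4]
    rw [hstep]
    have hb := chainVal_bounds seg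
    by_cases h1 : c = 'A'
    · subst h1
      have : solDna.getD 'A' 4 = 1 := by decide
      rw [this]
      simp only [chainVal, List.any_cons]
      simp
      omega
    · by_cases h2 : c = 'C'
      · subst h2
        have : solDna.getD 'C' 4 = 2 := by decide
        rw [this]
        simp only [chainVal, List.any_cons]
        simp
        split_ifs <;> omega
      · by_cases h3 : c = 'G'
        · subst h3
          have : solDna.getD 'G' 4 = 3 := by decide
          rw [this]
          simp only [chainVal, List.any_cons]
          simp
          split_ifs <;> omega
        · rw [getD_miss c h1 h2 h3]
          simp only [chainVal, List.any_cons]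
          simp [h1, h2, h3]
          split_ifs <;> omega

-- ---- prefix-count difference vs occurrence in the slice ----

lemma countP_take_split (pred : Char → Bool) (cs : List Char) (m k : Nat) (h : m ≤ k) :
    (cs.take k).countP pred
      = (cs.take m).countP pred + ((cs.drop m).take (k - m)).countP pred := by
  conv_lhs => rw [show k = m + (k - m) by omega]
  rw [List.take_add, List.countP_append]

lemma pyGetD4_zero (w x y z d : Int) : PySem.List.pyGetD [w,x,y,z] 0 d = w := rfl
lemma pyGetD4_one (w x y z d : Int) : PySem.List.pyGetD [w,x,y,z] 1 d = x := rfl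
lemma pyGetD4_two (w x y z d : Int) : PySem.List.pyGetD [w,x,y,z] 2 d = y := rfl
lemma pyGetD4_three (w x y z d : Int) : PySem.List.pyGetD [w,x,y,z] 3 d = z := rfl

lemma pair_eq (cs : List Char) (p q : Int) (hp0 : 0 ≤ p) (hp : p < (cs.length : Int))
    (hq0 : 0 ≤ q) (hq : q < (cs.length : Int))
    (hseed : solDna.getD ((PySem.Chars.pyGet? cs p).getD ' ') 0 ≤ 4) :
    solAVal cs p q = solBVal cs p q := by
  have hsnap := snapAux cs ([0,0,0,0]) []
  simp only [List.nil_append] at hsnap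
  simp only [solAVal, solBVal, hsnap]
  rw [PySem.List.pyGetD_eq_getElem _ _ hp0 (by simpa using hp),
      PySem.List.pyGetD_eq_getElem _ _ hq0 (by simpa using hq)]
  simp only [List.getElem_map, List.getElem_range, foldl_bump, zero_add,
    pyGetD4_zero, pyGetD4_one, pyGetD4_two, pyGetD4_three]
  rw [show PySem.Chars.slice cs (some (p + 1)) (some (q + 1))
        = PySem.List.slice cs (some (p + 1)) (some (q + 1)) from rfl,
      PySem.List.slice_toNat _ (by omega) (by omega),
      show (p + 1).toNat = p.toNat + 1 by omega, show (q + 1).toNat = q.toNat + 1 by omega]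
  by_cases hpq : p.toNat ≤ q.toNat
  · -- the queried range is non-empty: count differences detect occurrence in the slice
    have key : ∀ pred : Char → Bool,
        (((cs.take (p.toNat + 1)).countP pred : Int) < ((cs.take (q.toNat + 1)).countP pred : Int))
          ↔ ((cs.drop (p.toNat + 1)).take (q.toNat + 1 - (p.toNat + 1))).any pred = true := by
      intro pred
      rw [countP_take_split pred cs (p.toNat + 1) (q.toNat + 1) (by omega)]
      rw [show (((cs.take (p.toNat + 1)).countP pred : Int)
            < ((cs.take (p.toNat + 1)).countP pred
               + ((cs.drop (p.toNat + 1)).take (q.toNat + 1 - (p.toNat + 1))).countP pred : Nat))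
          ↔ 0 < ((cs.drop (p.toNat + 1)).take (q.toNat + 1 - (p.toNat + 1))).countP pred from by omega]
      rw [List.countP_pos_iff, ← List.any_eq_true]
    simp only [key, ite_self]
    rw [show (if ((cs.drop (p.toNat + 1)).take (q.toNat + 1 - (p.toNat + 1))).any (· == 'A') = true
              then (1:Int)
              else if ((cs.drop (p.toNat + 1)).take (q.toNat + 1 - (p.toNat + 1))).any (· == 'C') = true
              then 2
              else if ((cs.drop (p.toNat + 1)).take (q.toNat + 1 - (p.toNat + 1))).any (· == 'G') = true
              then 3 else 4)
          = chainVal ((cs.drop (p.toNat + 1)).take (q.toNat + 1 - (p.toNat + 1))) from rfl]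
    conv_rhs => rw [show solDna.getD ((PySem.Chars.pyGet? cs p).getD ' ') 0
        = min (solDna.getD ((PySem.Chars.pyGet? cs p).getD ' ') 0) 4 from (min_eq_left hseed).symm]
    rw [foldl_min_min, foldl_chain]
    exact min_comm _ _
  · -- degenerate range q < p: no count can increase and the slice is empty
    have hkey : ∀ pred : Char → Bool,
        ¬ (((cs.take (p.toNat + 1)).countP pred : Int) < ((cs.take (q.toNat + 1)).countP pred : Int)) := by
      intro pred
      rw [countP_take_split pred cs (q.toNat + 1) (p.toNat + 1) (by omega)]
      omega
    rw [if_neg (hkey _), if_neg (hkey _), if_neg (hkey _), if_neg (hkey _),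
        show q.toNat + 1 - (p.toNat + 1) = 0 by omega, List.take_zero, List.foldl_nil]
    exact min_eq_right hseed

-- ===== VERDICT (by name: the statement is the Claim_ definition above) =====
theorem solution_spec : Claim_equal_solution := by
  intro S P Q _ hpre
  unfold Spec_solution
  rw [solution_unfold, solution_alt_unfold]
  apply foldl_app_congr
  intro pq hmem
  obtain ⟨hp0, hp, hq0, hq, hch⟩ := hpre pq hmem
  have hseed : solDna.getD ((PySem.Chars.pyGet? S.toList pq.1).getD ' ') 0 ≤ 4 := by
    have hch' : (PySem.Chars.pyGet? S.toList pq.1).getD ' ' ∈ (['A','C','G','T'] : List Char) := hch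
    simp only [List.mem_cons, List.not_mem_nil, or_false] at hch'
    rcases hch' with h | h | h | h <;> rw [h] <;> decide
  exact pair_eq S.toList pq.1 pq.2 hp0 hp hq0 hq hseed
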